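-- pv_equiv track=rewrite | github.com/guruprasanth02/AI-Medicare | app.py | keyword_prompt_guard
-- ===== SOURCE A (Python) =====
-- def keyword_prompt_guard(prompt):
--     medical_banned = [
--         "overdose", "inject", "suicide", "self-harm", "euthanasia", "snort", "meth", "opioid",
--         "prescribe", "self-medicate", "cure cancer", "natural cure", "miracle treatment",
--         "abortion", "antivax", "homeopathy", "iv drip", "experimental drug", "black market"]
--     banned = ["bomb", "kill", "attack", "password", "rape", "terrorist", "drugs", "murder", "abuse"] + medical_banned
--     for word in banned:
--         if word in prompt.lower():
--             return False, "Prompt contains restricted terms."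
--     return True, ""
-- ===== SOURCE B (Python) =====
-- BANNED = ("bomb", "kill", "attack", "password", "rape", "terrorist", "drugs", "murder", "abuse",
--           "overdose", "inject", "suicide", "self-harm", "euthanasia", "snort", "meth", "opioid",
--           "prescribe", "self-medicate", "cure cancer", "natural cure", "miracle treatment",
--           "abortion", "antivax", "homeopathy", "iv drip", "experimental drug", "black market")
--
-- def keyword_prompt_guard(prompt):
--     # Single left-to-right pass over the lowered prompt: at each position test
--     # whether some banned word starts there (str.startswith with a tuple).
--     low = prompt.lower()
--     for i in range(len(low)):
--         if low.startswith(BANNED, i):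
--             return False, "Prompt contains restricted terms."
--     return True, ""
-- ===== Notes on version B (the rewrite author's own statement) =====
-- stated objective: alternative
-- what changed: A loops over the banned words doing a full substring scan per word (re-lowering the prompt each iteration); B lowers the prompt once and makes a single left-to-right pass over it, testing at each position whether any banned word starts there via one tuple-startswith call.
import Mathlib
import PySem

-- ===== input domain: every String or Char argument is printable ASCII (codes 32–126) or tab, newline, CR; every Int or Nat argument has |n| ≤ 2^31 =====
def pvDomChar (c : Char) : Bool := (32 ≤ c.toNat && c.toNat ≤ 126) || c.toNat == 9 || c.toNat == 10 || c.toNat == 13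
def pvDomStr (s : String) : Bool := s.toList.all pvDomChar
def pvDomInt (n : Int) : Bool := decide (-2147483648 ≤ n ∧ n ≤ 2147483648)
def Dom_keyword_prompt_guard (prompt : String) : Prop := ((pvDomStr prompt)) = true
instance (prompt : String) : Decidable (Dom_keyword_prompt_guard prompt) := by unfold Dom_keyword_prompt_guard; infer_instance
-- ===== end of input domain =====

-- B changes the traversal: instead of A's per-word substring scans (re-lowering the prompt
-- each iteration), B lowers once and makes one left-to-right pass testing at each position
-- whether any banned word starts there (objective: alternative).

-- ===== PORT A =====
def kpgMedicalBanned : List String :=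
  ["overdose", "inject", "suicide", "self-harm", "euthanasia", "snort", "meth", "opioid",
   "prescribe", "self-medicate", "cure cancer", "natural cure", "miracle treatment",
   "abortion", "antivax", "homeopathy", "iv drip", "experimental drug", "black market"]

def kpgBanned : List String :=
  ["bomb", "kill", "attack", "password", "rape", "terrorist", "drugs", "murder", "abuse"]
    ++ kpgMedicalBanned

-- the 'for word in banned' loop: first word with 'word in prompt.lower()' returns early
def kpgLoopA (prompt : String) : List String → Bool × String
  | [] => (true, "")
  | w :: ws =>
      if PySem.Str.isIn w (PySem.Str.lower prompt) then (false, "Prompt contains restricted terms.")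
      else kpgLoopA prompt ws

def keyword_prompt_guard (prompt : String) : Bool × String :=
  kpgLoopA prompt kpgBanned

-- ===== PORT B =====
def kpgBannedB : List (List Char) :=
  ["bomb", "kill", "attack", "password", "rape", "terrorist", "drugs", "murder", "abuse",
   "overdose", "inject", "suicide", "self-harm", "euthanasia", "snort", "meth", "opioid",
   "prescribe", "self-medicate", "cure cancer", "natural cure", "miracle treatment",
   "abortion", "antivax", "homeopathy", "iv drip", "experimental drug", "black market"].map String.toList

-- the 'for i in range(len(low))' pass: low.startswith(BANNED, i) at each position i
def kpgScanB : List Char → Bool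
  | [] => false
  | c :: t => kpgBannedB.any (fun w => w.isPrefixOf (c :: t)) || kpgScanB t

def keyword_prompt_guard_alt (prompt : String) : Bool × String :=
  if kpgScanB (PySem.Str.lower prompt).toList then (false, "Prompt contains restricted terms.")
  else (true, "")

-- ===== PRECONDITION & SPEC =====
def Spec_keyword_prompt_guard (prompt : String) (out : Bool × String) : Prop := out = keyword_prompt_guard_alt prompt
instance (prompt : String) (out : Bool × String) : Decidable (Spec_keyword_prompt_guard prompt out) := by unfold Spec_keyword_prompt_guard; infer_instance

-- ===== CLAIM (what is proved, stated in full; the proofs are below) =====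
def Claim_equal_keyword_prompt_guard : Prop := ∀ (prompt : String), Dom_keyword_prompt_guard prompt → Spec_keyword_prompt_guard prompt (keyword_prompt_guard prompt)

-- ===== LEMMAS AND PROOFS =====

-- B's position scan finds exactly the words occurring as an infix
theorem kpgScanB_iff (s : List Char) :
    kpgScanB s = true ↔ ∃ w ∈ kpgBannedB, w <:+: s := by
  induction s with
  | nil =>
      simp only [kpgScanB]
      constructor
      · intro h; cases h
      · rintro ⟨w, hw, hinf⟩
        rw [List.infix_nil] at hinf
        subst hinf
        revert hw; decide
  | cons c t ih =>
      simp only [kpgScanB, Bool.or_eq_true, List.any_eq_true, ih]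
      constructor
      · rintro (⟨w, hw, hp⟩ | ⟨w, hw, hinf⟩)
        · exact ⟨w, hw, (List.isPrefixOf_iff_prefix.mp hp).isInfix⟩
        · exact ⟨w, hw, hinf.trans (List.infix_cons_iff.mpr (Or.inr (List.infix_refl t)))⟩
      · rintro ⟨w, hw, hinf⟩
        rcases List.infix_cons_iff.mp hinf with hp | hinf'
        · exact Or.inl ⟨w, hw, List.isPrefixOf_iff_prefix.mpr hp⟩
        · exact Or.inr ⟨w, hw, hinf'⟩

-- A's loop equals an if on 'some banned word is a substring of the lowered prompt'
theorem kpgLoopA_eq (prompt : String) (ws : List String) :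
    kpgLoopA prompt ws =
      if ws.any (fun w => PySem.Str.isIn w (PySem.Str.lower prompt)) then
        (false, "Prompt contains restricted terms.")
      else (true, "") := by
  induction ws with
  | nil => simp [kpgLoopA]
  | cons w ws ih =>
      simp only [kpgLoopA, List.any_cons, ih]
      by_cases h : PySem.Str.isIn w (PySem.Str.lower prompt) = true
      · rw [if_pos h]
        have h' : PySem.Chars.isIn w.toList (PySem.Chars.lower prompt.toList) = true := by
          simpa using h
        simp [h']
      · have hf : PySem.Str.isIn w (PySem.Str.lower prompt) = false := by
          simpa using h
        rw [if_neg h]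
        have h' : PySem.Chars.isIn w.toList (PySem.Chars.lower prompt.toList) = false := by
          simpa using hf
        simp [h']

theorem kpgBannedB_eq : kpgBannedB = kpgBanned.map String.toList := by rfl

-- ===== VERDICT (by name: the statement is the Claim_ definition above) =====
theorem keyword_prompt_guard_spec : Claim_equal_keyword_prompt_guard := by
  intro prompt _
  unfold Spec_keyword_prompt_guard keyword_prompt_guard keyword_prompt_guard_alt
  rw [kpgLoopA_eq]
  have hb : kpgScanB (PySem.Str.lower prompt).toList
      = kpgBanned.any (fun w => PySem.Str.isIn w (PySem.Str.lower prompt)) := by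
    rw [Bool.eq_iff_iff, kpgScanB_iff, List.any_eq_true]
    constructor
    · rintro ⟨w, hw, hinf⟩
      rw [kpgBannedB_eq] at hw
      rcases List.mem_map.mp hw with ⟨w', hw', rfl⟩
      refine ⟨w', hw', ?_⟩
      rw [PySem.Str.isIn_eq]
      exact (PySem.Chars.isIn_iff_infix _ _).mpr hinf
    · rintro ⟨w, hw, hin⟩
      rw [PySem.Str.isIn_eq] at hin
      exact ⟨w.toList, kpgBannedB_eq ▸ List.mem_map_of_mem hw,
        (PySem.Chars.isIn_iff_infix _ _).mp hin⟩
  rw [hb]
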